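-- pv_equiv track=rewrite | github.com/ThanhVan8/Minesweeper_AI | test.py | combinations_negative
-- ===== SOURCE A (Python) =====
-- def combinations_negative(ValueList, k):
--     if k == 0:
--         return [[]]
--     if not ValueList:
--         return []
--
--     result = []
--     first, rest = ValueList[0], ValueList[1:]
--     for combo in combinations_negative(rest, k - 1):
--         result.append([-first] + combo)  # Đổi dấu cho phần tử đầu tiên
--     result.extend(combinations_negative(rest, k))
--     return result
-- ===== SOURCE B (Python) =====
-- def combinations_negative(ValueList, k):
--     # Bottom-up DP over suffixes: one table row per combination size,
--     # instead of A's branching recursion that recomputes suffix subproblems.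
--     if k < 0 or k > len(ValueList):
--         return []
--     dp = [[[]]] + [[] for _ in range(k)]  # dp[j] = size-j combos of current suffix
--     for x in reversed(ValueList):
--         dp = [dp[0]] + [[[-x] + c for c in dp[j - 1]] + dp[j]
--                         for j in range(1, len(dp))]
--     return dp[k]
-- ===== Notes on version B (the rewrite author's own statement) =====
-- stated objective: alternative
-- what changed: Replaced the branching recursion (which recomputes each suffix subproblem many times) by a bottom-up dynamic program that sweeps the list once keeping one table row per combination size.
import Mathlib
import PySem

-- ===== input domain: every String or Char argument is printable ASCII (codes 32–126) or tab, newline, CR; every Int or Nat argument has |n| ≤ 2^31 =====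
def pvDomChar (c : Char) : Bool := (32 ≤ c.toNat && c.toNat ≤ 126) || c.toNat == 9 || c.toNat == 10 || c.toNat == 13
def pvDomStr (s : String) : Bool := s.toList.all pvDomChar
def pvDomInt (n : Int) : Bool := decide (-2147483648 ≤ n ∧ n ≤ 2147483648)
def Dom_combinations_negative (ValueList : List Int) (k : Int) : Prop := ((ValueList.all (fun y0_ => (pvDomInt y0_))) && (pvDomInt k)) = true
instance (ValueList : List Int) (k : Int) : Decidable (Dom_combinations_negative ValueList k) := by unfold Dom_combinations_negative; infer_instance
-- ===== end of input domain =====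

-- B replaces A's branching recursion by a bottom-up DP over suffixes (one table row per size).

-- ===== PORT A =====
-- literal port of A's recursion: k == 0 → [[]]; empty list → []; else prepend -first to the
-- (k-1)-combinations of the rest, then extend with the k-combinations of the rest
def combinations_negative (ValueList : List Int) (k : Int) : List (List Int) :=
  if k = 0 then [[]]
  else
    match ValueList with
    | [] => []
    | first :: rest =>
        ((combinations_negative rest (k - 1)).map (fun combo => -first :: combo))
          ++ combinations_negative rest k

-- ===== PORT B =====
-- one DP step: dp' = [dp[0]] ++ [map (-x ::) dp[j-1] ++ dp[j] for j = 1..len(dp)-1]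
def cnStep (x : Int) (dp : List (List (List Int))) : List (List (List Int)) :=
  match dp with
  | [] => []
  | d0 :: rest =>
      d0 :: List.zipWith (fun prev cur => prev.map (fun c => -x :: c) ++ cur) (d0 :: rest) rest

def combinations_negative_alt (ValueList : List Int) (k : Int) : List (List Int) :=
  if k < 0 ∨ (ValueList.length : Int) < k then []
  else
    -- dp[j] = size-j combos of current suffix; start with the empty suffix
    let dp0 : List (List (List Int)) := [[]] :: List.replicate k.toNat []
    -- loop over reversed(ValueList) = foldr over ValueList
    (ValueList.foldr cnStep dp0).getD k.toNat []

-- ===== PRECONDITION & SPEC =====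
def Spec_combinations_negative (ValueList : List Int) (k : Int) (out : List (List Int)) : Prop := out = combinations_negative_alt ValueList k
instance (ValueList : List Int) (k : Int) (out : List (List Int)) : Decidable (Spec_combinations_negative ValueList k out) := by unfold Spec_combinations_negative; infer_instance

-- ===== CLAIM (what is proved, stated in full; the proofs are below) =====
def Claim_equal_combinations_negative : Prop := ∀ (ValueList : List Int) (k : Int), Dom_combinations_negative ValueList k → Spec_combinations_negative ValueList k (combinations_negative ValueList k)

-- ===== LEMMAS AND PROOFS =====

-- tbl vl j n = [A vl j, A vl (j+1), …, A vl (j+n)]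
def cnTbl (vl : List Int) (j : Int) : Nat → List (List (List Int))
  | 0 => [combinations_negative vl j]
  | n + 1 => combinations_negative vl j :: cnTbl vl (j + 1) n

theorem cn_zero (vl : List Int) : combinations_negative vl 0 = [[]] := by
  cases vl <;> simp [combinations_negative]

theorem cn_nil (j : Int) (hj : j ≠ 0) : combinations_negative [] j = [] := by
  simp [combinations_negative, hj]

theorem cn_neg (vl : List Int) (k : Int) (hk : k < 0) : combinations_negative vl k = [] := by
  induction vl generalizing k with
  | nil => exact cn_nil k (by omega)
  | cons x rest ih =>
      rw [combinations_negative]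
      simp [show ¬ k = 0 by omega, ih (k - 1) (by omega), ih k hk]

theorem cn_big (vl : List Int) (k : Int) (hk : (vl.length : Int) < k) :
    combinations_negative vl k = [] := by
  induction vl generalizing k with
  | nil => exact cn_nil k (by simp at hk; omega)
  | cons x rest ih =>
      rw [combinations_negative]
      simp only [List.length_cons] at hk
      simp [show ¬ k = 0 by omega, ih (k - 1) (by push_cast at hk; omega),
            ih k (by push_cast at hk; omega)]

theorem cnTbl_nil (j : Int) (hj : 1 ≤ j) (n : Nat) :
    cnTbl [] j n = List.replicate (n + 1) [] := by
  induction n generalizing j with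
  | zero => simp [cnTbl, cn_nil j (by omega)]
  | succ n ih => simp [cnTbl, cn_nil j (by omega), ih (j + 1) (by omega), List.replicate_succ]

theorem cnTbl_nil_zero (n : Nat) : cnTbl [] 0 n = [[]] :: List.replicate n [] := by
  cases n with
  | zero => simp [cnTbl, cn_zero]
  | succ n => simp [cnTbl, cn_zero, cnTbl_nil 1 (by omega) n]

theorem cn_zipWith (x : Int) (rest : List Int) (n : Nat) (j : Int) (hj : 0 ≤ j) :
    List.zipWith (fun prev cur => prev.map (fun c => -x :: c) ++ cur)
      (cnTbl rest j (n + 1)) (cnTbl rest (j + 1) n)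
      = cnTbl (x :: rest) (j + 1) n := by
  induction n generalizing j with
  | zero =>
      simp only [cnTbl, List.zipWith]
      rw [show combinations_negative (x :: rest) (j + 1)
            = ((combinations_negative rest (j + 1 - 1)).map (fun combo => -x :: combo))
                ++ combinations_negative rest (j + 1) by
          rw [combinations_negative]; simp [show ¬ j + 1 = 0 by omega]]
      simp
  | succ n ih =>
      show List.zipWith _
          (combinations_negative rest j :: cnTbl rest (j + 1) (n + 1))
          (combinations_negative rest (j + 1) :: cnTbl rest (j + 1 + 1) n) = _
      simp only [List.zipWith]
      rw [ih (j + 1) (by omega)]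
      show _ = combinations_negative (x :: rest) (j + 1) :: cnTbl (x :: rest) (j + 1 + 1) n
      congr 1
      rw [show combinations_negative (x :: rest) (j + 1)
            = ((combinations_negative rest (j + 1 - 1)).map (fun combo => -x :: combo))
                ++ combinations_negative rest (j + 1) by
          rw [combinations_negative]; simp [show ¬ j + 1 = 0 by omega]]
      simp

theorem cn_foldr (vl : List Int) (n : Nat) :
    vl.foldr cnStep ([[]] :: List.replicate n []) = cnTbl vl 0 n := by
  induction vl with
  | nil => simp [cnTbl_nil_zero]
  | cons x rest ih =>
      simp only [List.foldr, ih]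
      cases n with
      | zero => simp [cnTbl, cnStep, cn_zero]
      | succ n =>
          show cnStep x (combinations_negative rest 0 :: cnTbl rest 1 n)
              = combinations_negative (x :: rest) 0 :: cnTbl (x :: rest) 1 n
          rw [cnStep]
          have h := cn_zipWith x rest n 0 (le_refl 0)
          norm_num at h
          rw [show (combinations_negative rest 0 :: cnTbl rest 1 n) = cnTbl rest 0 (n + 1) by
                simp [cnTbl], h, cn_zero, cn_zero]

theorem cnTbl_getD (vl : List Int) (n : Nat) (j : Int) :
    (cnTbl vl j n).getD n [] = combinations_negative vl (j + n) := by
  induction n generalizing j with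
  | zero => simp [cnTbl]
  | succ n ih =>
      show (cnTbl vl (j + 1) n).getD n [] = _
      rw [ih (j + 1)]; congr 1; omega

-- ===== VERDICT (by name: the statement is the Claim_ definition above) =====
theorem combinations_negative_spec : Claim_equal_combinations_negative := by
  intro vl k _
  show combinations_negative vl k = combinations_negative_alt vl k
  unfold combinations_negative_alt
  by_cases hk : k < 0 ∨ (vl.length : Int) < k
  · rcases hk with hk | hk
    · simp [hk, cn_neg vl k hk]
    · simp [hk, cn_big vl k hk]
  · simp only [hk, if_false]
    rw [not_or, not_lt, not_lt] at hk
    obtain ⟨hk, _⟩ := hk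
    rw [cn_foldr vl k.toNat, cnTbl_getD vl k.toNat 0]
    congr 1
    omega
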